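-- pv_equiv track=rewrite | github.com/mechauk418/BOJ | 프로그래머스/3/250134. ［PCCP 기출문제］ 4번 ／ 수레 움직이기/［PCCP 기출문제］ 4번 ／ 수레 움직이기.py | solution
-- ===== SOURCE A (Python) =====
-- from collections import deque
-- import copy
--
-- def solution(maze):
--     m, n = len(maze), len(maze[0])
--
--     red, blue = [], []
--     for i in range(m):
--         for j in range(n):
--             if maze[i][j] == 1:
--                 red = [i, j]
--             elif maze[i][j] == 2:
--                 blue = [i, j]
--
--     dr = [-1, 1, 0, 0]
--     dc = [0, 0, -1, 1]
--
--     red_reached, blue_reached = False, False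
--     vr_, vb_ = [[[False for _ in range(n)] for _ in range(m)] for _ in range(2)]
--
--     path = deque()
--     path.append(red + blue + [vr_] + [vb_] + [0])
--
--     while path:
--         rr, rc, br, bc, vr_temp, vb_temp, count = path.popleft()
--
--         vr = copy.deepcopy(vr_temp)
--         vb = copy.deepcopy(vb_temp)
--         vr[rr][rc] = True
--         vb[br][bc] = True
--
--         if maze[rr][rc] == 3 and maze[br][bc] == 4:
--             return count
--             break
--
--         else:
--             if maze[rr][rc] == 3:
--                 red_reached = True
--                 blue_reached = False
--             elif maze[br][bc] == 4:
--                 red_reached = False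
--                 blue_reached = True
--             else:
--                 red_reached = False
--                 blue_reached = False
--
--         for i in range(4):
--             if blue_reached:
--                 r = [rr + dr[i], rc + dc[i]]
--                 if is_bounded(r, m, n):
--                     if not (is_overlapped(r, (br, bc)) or is_wall(r, maze) or is_visited(r, vr)):
--                         path.append([r[0], r[1], br, bc, vr, vb, count + 1])
--             elif red_reached:
--                 b = [br + dr[i], bc + dc[i]]
--                 if is_bounded(b, m, n):
--                     if not (is_overlapped(b, (rr, rc)) or is_wall(b, maze) or is_visited(b, vb)):
--                         path.append([rr, rc, b[0], b[1], vr, vb, count + 1])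
--             else:
--                 r = [rr + dr[i], rc + dc[i]]
--                 if is_bounded(r, m, n):
--                     if not (is_wall(r, maze) or is_visited(r, vr)):
--                         for j in range(4):
--                             b = [br + dr[j], bc + dc[j]]
--                             if is_bounded(b, m, n):
--                                 if not (is_overlapped(r, b) or is_switched(r, (br, bc), b, (rr, rc)) or is_wall(b,maze) or is_visited(b, vb)):
--                                     path.append([r[0], r[1], b[0], b[1], vr, vb, count + 1])
--     return 0
--
-- def is_bounded(x, m, n):
--     return 0 <= x[0] < m and 0 <= x[1] < n
--
-- def is_wall(x, map):
--     return map[x[0]][x[1]] == 5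
--
-- def is_overlapped(x, y):
--     return (x[0], x[1]) == (y[0], y[1])
--
-- def is_switched(x, y, z, w):
--     return (x[0], x[1]) == (y[0], y[1]) and (z[0], z[1]) == (w[0], w[1])
--
-- def is_visited(n, v):
--     return v[n[0]][n[1]]
-- ===== SOURCE B (Python) =====
-- def solution(maze):
--     # DFS with backtracking on two shared visited grids (mark, recurse, unmark),
--     # taking the minimum move count over all complete goal paths, instead of A's
--     # BFS with a deque and a deepcopy of both visited grids per dequeued state.
--     m, n = len(maze), len(maze[0])
--
--     ones = [(i, j) for i in range(m) for j in range(n) if maze[i][j] == 1]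
--     twos = [(i, j) for i in range(m) for j in range(n) if maze[i][j] == 2]
--     sr, sc = ones[-1]
--     sb, sd = twos[-1]
--
--     DIRS = ((-1, 0), (1, 0), (0, -1), (0, 1))
--     vr = [[False] * n for _ in range(m)]
--     vb = [[False] * n for _ in range(m)]
--
--     def dfs(rr, rc, br, bc):
--         old_r, old_b = vr[rr][rc], vb[br][bc]
--         vr[rr][rc] = True
--         vb[br][bc] = True
--         if maze[rr][rc] == 3 and maze[br][bc] == 4:
--             vr[rr][rc], vb[br][bc] = old_r, old_b
--             return 0
--         if maze[rr][rc] == 3: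
--             moves = [(rr, rc, br + di, bc + dj) for di, dj in DIRS
--                      if 0 <= br + di < m and 0 <= bc + dj < n
--                      and (br + di, bc + dj) != (rr, rc)
--                      and maze[br + di][bc + dj] != 5
--                      and not vb[br + di][bc + dj]]
--         elif maze[br][bc] == 4:
--             moves = [(rr + di, rc + dj, br, bc) for di, dj in DIRS
--                      if 0 <= rr + di < m and 0 <= rc + dj < n
--                      and (rr + di, rc + dj) != (br, bc)
--                      and maze[rr + di][rc + dj] != 5
--                      and not vr[rr + di][rc + dj]]
--         else:
--             reds = [(rr + di, rc + dj) for di, dj in DIRS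
--                     if 0 <= rr + di < m and 0 <= rc + dj < n
--                     and maze[rr + di][rc + dj] != 5
--                     and not vr[rr + di][rc + dj]]
--             moves = [(r1, c1, br + di, bc + dj)
--                      for r1, c1 in reds
--                      for di, dj in DIRS
--                      if 0 <= br + di < m and 0 <= bc + dj < n
--                      and (r1, c1) != (br + di, bc + dj)
--                      and not ((r1, c1) == (br, bc) and (br + di, bc + dj) == (rr, rc))
--                      and maze[br + di][bc + dj] != 5
--                      and not vb[br + di][bc + dj]]
--         best = None
--         for mv in moves:
--             d = dfs(*mv)
--             if d is not None and (best is None or d + 1 < best):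
--                 best = d + 1
--         vr[rr][rc], vb[br][bc] = old_r, old_b
--         return best
--
--     ans = dfs(sr, sc, sb, sd)
--     return ans if ans is not None else 0
-- ===== Notes on version B (the rewrite author's own statement) =====
-- stated objective: alternative
-- what changed: A's BFS over a deque of states, each carrying deepcopied visited grids, is replaced by a recursive DFS with backtracking on two shared visited grids (mark, recurse, unmark) that returns the minimum move count over all complete goal paths; since the per-path search tree is the same and a goal state is a leaf, the minimum path depth equals the BFS level of the first goal dequeued.
import Mathlib
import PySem

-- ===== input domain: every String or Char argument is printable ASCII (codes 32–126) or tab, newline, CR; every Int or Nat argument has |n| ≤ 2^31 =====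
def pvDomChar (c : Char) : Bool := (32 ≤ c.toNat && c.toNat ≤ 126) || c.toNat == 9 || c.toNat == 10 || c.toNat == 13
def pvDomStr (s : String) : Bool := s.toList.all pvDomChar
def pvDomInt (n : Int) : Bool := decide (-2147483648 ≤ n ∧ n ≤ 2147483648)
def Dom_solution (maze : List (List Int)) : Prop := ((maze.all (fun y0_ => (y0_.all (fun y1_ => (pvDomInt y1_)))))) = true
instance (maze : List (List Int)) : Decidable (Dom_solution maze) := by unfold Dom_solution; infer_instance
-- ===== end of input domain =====

-- B replaces A's deque BFS (with a deepcopy of both visited grids per dequeued state) by a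
-- recursive DFS with backtracking that takes the minimum move count over all complete goal paths.
-- A mutates nothing observable; the equivalence is about the return value.

-- ===== shared low-level helpers (Python-exact grid access, used by both ports) =====

-- maze[i][j] / v[i][j]: every executed access is in bounds under Pre_ and the BFS/DFS
-- bounds guards, so the .getD defaults are never taken on admitted inputs.
def pvCell (maze : List (List Int)) (i j : Int) : Int :=
  PySem.List.pyGetD (PySem.List.pyGetD maze i []) j 0

def pvVGet (v : List (List Bool)) (i j : Int) : Bool :=
  PySem.List.pyGetD (PySem.List.pyGetD v i []) j false

-- v[i][j] = True  (Python in-place row assignment, as a pure value)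
def pvVSet (v : List (List Bool)) (i j : Int) : List (List Bool) :=
  PySem.List.pySetD v i (PySem.List.pySetD (PySem.List.pyGetD v i []) j true)

def pvBounded (i j m n : Int) : Bool :=
  decide (0 ≤ i) && decide (i < m) && decide (0 ≤ j) && decide (j < n)

def pvDirs : List (Int × Int) := [(-1, 0), (1, 0), (0, -1), (0, 1)]

-- number of unvisited (False) cells: termination measure component
def pvFalse (v : List (List Bool)) : Nat := (v.map (fun row => row.count false)).sum

-- grid shape check (totality guard for the recursions; always true on reachable states)
def pvShape (v : List (List Bool)) (m n : Int) : Bool :=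
  ((v.length : Int) == m) && v.all (fun row => ((row.length : Int) == n))

-- ===== termination lemmas for the two search recursions (cited by decreasing_by) =====

lemma pvCountFalse_set_le (row : List Bool) (k : Nat) :
    (row.set k true).count false ≤ row.count false := by
  induction row generalizing k with
  | nil => simp
  | cons a t ih =>
    cases k with
    | zero => cases a <;> simp [List.set, List.count_cons] <;> omega
    | succ k => cases a <;> simp [List.set, List.count_cons] <;> exact ih k

lemma pvCountFalse_set_lt (row : List Bool) (k : Nat) (hk : k < row.length)
    (hv : row[k]? = some false) : (row.set k true).count false < row.count false := by
  induction row generalizing k with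
  | nil => simp at hk
  | cons a t ih =>
    cases k with
    | zero =>
      simp at hv; subst hv
      simp [List.set, List.count_cons]
    | succ k =>
      simp at hv hk
      cases a <;> simp [List.set, List.count_cons]
      · exact ih k hk hv
      · exact ih k hk hv

-- pySetD either leaves the list alone or replaces position k by the given row,
-- with pyGetD reading that same position k.
lemma pvSetD_cases {α : Type} (xs : List α) (i : Int) (x d : α) :
    PySem.List.pySetD xs i x = xs ∨
    ∃ (k : Nat) (hk : k < xs.length), PySem.List.pyGetD xs i d = xs[k] ∧
      PySem.List.pySetD xs i x = xs.set k x := by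
  unfold PySem.List.pySetD PySem.List.pySet? PySem.List.pyGetD PySem.List.pyGet? PySem.List.pyIdx?
  split_ifs with h1 h2 h3
  · right
    have hlt : i.toNat < xs.length := by omega
    exact ⟨i.toNat, hlt, by simp [List.getElem?_eq_getElem hlt], rfl⟩
  · left; rfl
  · right
    have hlt : xs.length - (-i).toNat < xs.length := by omega
    exact ⟨_, hlt, by simp [List.getElem?_eq_getElem hlt], rfl⟩
  · left; rfl

lemma pvSumSet_le (ns : List Nat) (k : Nat) (x : Nat)
    (h : ∀ hk : k < ns.length, x ≤ ns[k]) : (ns.set k x).sum ≤ ns.sum := by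
  induction ns generalizing k with
  | nil => simp
  | cons a t ih =>
    cases k with
    | zero => have := h (by simp); simp at this ⊢; omega
    | succ k =>
      simp [List.set]
      have := ih k (fun hk => by simpa using h (by simpa using Nat.succ_lt_succ hk))
      omega

lemma pvSumSet_lt (ns : List Nat) (k : Nat) (x : Nat) (hk : k < ns.length)
    (h : x < ns[k]) : (ns.set k x).sum < ns.sum := by
  induction ns generalizing k with
  | nil => simp at hk
  | cons a t ih =>
    cases k with
    | zero => simp at h ⊢; omega
    | succ k =>
      simp at hk h
      simp [List.set]
      have := ih k hk h
      omega

-- marking a cell never increases the number of unvisited cells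
lemma pvFalse_vset_le (v : List (List Bool)) (i j : Int) :
    pvFalse (pvVSet v i j) ≤ pvFalse v := by
  unfold pvVSet pvFalse
  rcases pvSetD_cases v i (PySem.List.pySetD (PySem.List.pyGetD v i []) j true) [] with h | ⟨k, hk, hg, hs⟩
  · rw [h]
  · rw [hs, List.map_set]
    apply pvSumSet_le
    intro hk2
    rw [List.getElem_map]
    rcases pvSetD_cases (PySem.List.pyGetD v i []) j true true with h2 | ⟨k2, hk2', _, hs2⟩
    · rw [h2, hg]
    · rw [hs2, hg]
      exact pvCountFalse_set_le _ _

-- marking an in-bounds unvisited cell of a well-shaped grid strictly decreases it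
lemma pvFalse_vset_lt (v : List (List Bool)) (i j m n : Int)
    (hs : pvShape v m n = true) (hb : pvBounded i j m n = true)
    (hg : pvVGet v i j = false) : pvFalse (pvVSet v i j) < pvFalse v := by
  unfold pvShape at hs
  unfold pvBounded at hb
  simp only [Bool.and_eq_true, beq_iff_eq, decide_eq_true_eq, List.all_eq_true] at hs hb
  obtain ⟨hlen, hrows⟩ := hs
  obtain ⟨⟨⟨hi0, him⟩, hj0⟩, hjn⟩ := hb
  have hiv : i.toNat < v.length := by omega
  have hrow : PySem.List.pyGetD v i [] = v[i.toNat] := by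
    rw [PySem.List.pyGetD_of_nonneg _ _ hi0, List.getD_eq_getElem?_getD,
      List.getElem?_eq_getElem hiv]
    rfl
  have hrlen : j.toNat < (v[i.toNat]).length := by
    have := hrows _ (List.getElem_mem hiv)
    omega
  have hcell : (v[i.toNat])[j.toNat] = false := by
    unfold pvVGet at hg
    rw [hrow, PySem.List.pyGetD_of_nonneg _ _ hj0, List.getD_eq_getElem?_getD,
      List.getElem?_eq_getElem hrlen] at hg
    exact hg
  unfold pvVSet
  rw [hrow, PySem.List.pySetD_of_nonneg _ _ hj0, PySem.List.pySetD_of_nonneg _ _ hi0]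
  unfold pvFalse
  rw [List.map_set]
  apply pvSumSet_lt _ _ _ (by simpa using hiv)
  rw [List.getElem_map]
  apply pvCountFalse_set_lt _ _ hrlen
  rw [List.getElem?_eq_getElem hrlen, hcell]

-- ===== PORT A =====

abbrev PvEntry : Type := Int × Int × Int × Int × List (List Bool) × List (List Bool) × Int

-- BFS queue-entry weight: 17^(unvisited cells after marking the entry's own positions)
def pvWt : PvEntry → Nat
  | (rr, rc, br, bc, vrt, vbt, _) =>
    17 ^ (pvFalse (pvVSet vrt rr rc) + pvFalse (pvVSet vbt br bc))

-- the for-i (and nested for-j) loops of A's BFS body, with their conditional appends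
def pvChildrenA (maze : List (List Int)) (m n rr rc br bc : Int)
    (blueReached redReached : Bool) (vr vb : List (List Bool)) :
    List (Int × Int × Int × Int) :=
  pvDirs.flatMap (fun d =>
    if blueReached then
      if pvBounded (rr + d.1) (rc + d.2) m n then
        if !(((rr + d.1, rc + d.2) == (br, bc)) || (pvCell maze (rr + d.1) (rc + d.2) == 5)
             || pvVGet vr (rr + d.1) (rc + d.2)) then
          [(rr + d.1, rc + d.2, br, bc)]
        else []
      else []
    else if redReached then
      if pvBounded (br + d.1) (bc + d.2) m n then
        if !(((br + d.1, bc + d.2) == (rr, rc)) || (pvCell maze (br + d.1) (bc + d.2) == 5)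
             || pvVGet vb (br + d.1) (bc + d.2)) then
          [(rr, rc, br + d.1, bc + d.2)]
        else []
      else []
    else
      if pvBounded (rr + d.1) (rc + d.2) m n then
        if !((pvCell maze (rr + d.1) (rc + d.2) == 5) || pvVGet vr (rr + d.1) (rc + d.2)) then
          pvDirs.flatMap (fun e =>
            if pvBounded (br + e.1) (bc + e.2) m n then
              if !(((rr + d.1, rc + d.2) == (br + e.1, bc + e.2))
                   || (((rr + d.1, rc + d.2) == (br, bc)) && ((br + e.1, bc + e.2) == (rr, rc)))
                   || (pvCell maze (br + e.1) (bc + e.2) == 5)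
                   || pvVGet vb (br + e.1) (bc + e.2)) then
                [(rr + d.1, rc + d.2, br + e.1, bc + e.2)]
              else []
            else [])
        else []
      else [])

lemma pvChildrenA_exp_lt {maze : List (List Int)} {m n rr rc br bc : Int}
    {fb fr : Bool} {vr vb : List (List Bool)}
    {mv : Int × Int × Int × Int}
    (hvr : pvShape vr m n = true) (hvb : pvShape vb m n = true)
    (hm : mv ∈ pvChildrenA maze m n rr rc br bc fb fr vr vb) :
    pvFalse (pvVSet vr mv.1 mv.2.1) + pvFalse (pvVSet vb mv.2.2.1 mv.2.2.2)
      < pvFalse vr + pvFalse vb := by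
  rcases List.mem_flatMap.1 hm with ⟨d, _, hmem⟩
  by_cases hfb : fb = true
  · rw [if_pos hfb, List.mem_ite_nil_right, List.mem_ite_nil_right] at hmem
    obtain ⟨h1, h2, hmem⟩ := hmem
    simp only [List.mem_singleton] at hmem
    subst hmem
    simp only [Bool.not_eq_true', Bool.or_eq_false_iff] at h2
    have := pvFalse_vset_lt vr (rr + d.1) (rc + d.2) m n hvr h1 h2.2
    have := pvFalse_vset_le vb br bc
    simp only []
    omega
  · rw [if_neg hfb] at hmem
    by_cases hfr : fr = true
    · rw [if_pos hfr, List.mem_ite_nil_right, List.mem_ite_nil_right] at hmem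
      obtain ⟨h1, h2, hmem⟩ := hmem
      simp only [List.mem_singleton] at hmem
      subst hmem
      simp only [Bool.not_eq_true', Bool.or_eq_false_iff] at h2
      have := pvFalse_vset_lt vb (br + d.1) (bc + d.2) m n hvb h1 h2.2
      have := pvFalse_vset_le vr rr rc
      simp only []
      omega
    · rw [if_neg hfr, List.mem_ite_nil_right, List.mem_ite_nil_right] at hmem
      obtain ⟨h1, h2, hmem⟩ := hmem
      rcases List.mem_flatMap.1 hmem with ⟨e, _, hmem2⟩
      rw [List.mem_ite_nil_right, List.mem_ite_nil_right] at hmem2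
      obtain ⟨h3, h4, hmem2⟩ := hmem2
      simp only [List.mem_singleton] at hmem2
      subst hmem2
      simp only [Bool.not_eq_true', Bool.or_eq_false_iff] at h2
      have := pvFalse_vset_lt vr (rr + d.1) (rc + d.2) m n hvr h1 h2.2
      have := pvFalse_vset_le vb (br + e.1) (bc + e.2)
      simp only []
      omega

lemma pvFlatMap4_len {α : Type} (f : (Int × Int) → List α) (c : Nat)
    (h : ∀ d, (f d).length ≤ c) : (pvDirs.flatMap f).length ≤ 4 * c := by
  have h1 := h (-1, 0); have h2 := h (1, 0); have h3 := h (0, -1); have h4 := h (0, 1)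
  simp [pvDirs]
  omega

lemma pvChildrenA_len {maze : List (List Int)} {m n rr rc br bc : Int}
    {fb fr : Bool} {vr vb : List (List Bool)} :
    (pvChildrenA maze m n rr rc br bc fb fr vr vb).length ≤ 16 := by
  unfold pvChildrenA
  rw [show (16 : Nat) = 4 * 4 from by norm_num]
  apply pvFlatMap4_len
  intro d
  split_ifs
  all_goals
    first
    | (rw [show (4 : Nat) = 4 * 1 from by norm_num]
       apply pvFlatMap4_len
       intro e
       split_ifs <;> simp)
    | simp

lemma pvChildrenA_wtsum_lt {maze : List (List Int)} {m n rr rc br bc : Int}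
    {fb fr : Bool} {vr vb : List (List Bool)}
    (hvr : pvShape vr m n = true) (hvb : pvShape vb m n = true) :
    ((pvChildrenA maze m n rr rc br bc fb fr vr vb).map
      (fun mv => 17 ^ (pvFalse (pvVSet vr mv.1 mv.2.1) + pvFalse (pvVSet vb mv.2.2.1 mv.2.2.2)))).sum
      < 17 ^ (pvFalse vr + pvFalse vb) := by
  cases hne : pvChildrenA maze m n rr rc br bc fb fr vr vb with
  | nil => simpa [hne] using Nat.pow_pos (n := pvFalse vr + pvFalse vb) (by norm_num)
  | cons a t =>
    have hE : 1 ≤ pvFalse vr + pvFalse vb := by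
      have := pvChildrenA_exp_lt hvr hvb (mv := a) (by rw [hne]; exact List.mem_cons_self)
      omega
    have hbound : ∀ x ∈ (pvChildrenA maze m n rr rc br bc fb fr vr vb).map
        (fun mv => 17 ^ (pvFalse (pvVSet vr mv.1 mv.2.1) + pvFalse (pvVSet vb mv.2.2.1 mv.2.2.2))),
        x ≤ 17 ^ (pvFalse vr + pvFalse vb - 1) := by
      intro x hx
      rcases List.mem_map.1 hx with ⟨mv, hmv, rfl⟩
      have := pvChildrenA_exp_lt hvr hvb hmv
      exact Nat.pow_le_pow_right (by norm_num) (by omega)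
    have hsum := List.sum_le_card_nsmul _ _ hbound
    rw [List.length_map] at hsum
    have hlen : (pvChildrenA maze m n rr rc br bc fb fr vr vb).length ≤ 16 := pvChildrenA_len
    have hpos : 0 < 17 ^ (pvFalse vr + pvFalse vb - 1) := Nat.pow_pos (by norm_num)
    have h17 : 17 ^ (pvFalse vr + pvFalse vb)
        = 17 * 17 ^ (pvFalse vr + pvFalse vb - 1) := by
      conv_lhs => rw [show pvFalse vr + pvFalse vb = (pvFalse vr + pvFalse vb - 1) + 1 from by omega]
      rw [pow_succ]
      ring
    rw [← hne] at *
    simp only [smul_eq_mul] at hsum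
    calc ((pvChildrenA maze m n rr rc br bc fb fr vr vb).map
          (fun mv => 17 ^ (pvFalse (pvVSet vr mv.1 mv.2.1) + pvFalse (pvVSet vb mv.2.2.1 mv.2.2.2)))).sum
        ≤ (pvChildrenA maze m n rr rc br bc fb fr vr vb).length
            * 17 ^ (pvFalse vr + pvFalse vb - 1) := hsum
      _ ≤ 16 * 17 ^ (pvFalse vr + pvFalse vb - 1) := by
          exact Nat.mul_le_mul_right _ hlen
      _ < 17 * 17 ^ (pvFalse vr + pvFalse vb - 1) := by omega
      _ = 17 ^ (pvFalse vr + pvFalse vb) := h17.symm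

-- A's while loop over the deque; copy.deepcopy of a visited grid is the pure value itself.
-- The pvShape test is a totality guard (it always holds on reachable states, Lemma pvInv below).
def pvGoA (maze : List (List Int)) (m n : Int) : List PvEntry → Int
  | [] => 0
  | (rr, rc, br, bc, vrt, vbt, cnt) :: rest =>
    if pvCell maze rr rc == 3 && pvCell maze br bc == 4 then cnt
    else if h : pvShape (pvVSet vrt rr rc) m n && pvShape (pvVSet vbt br bc) m n then
      pvGoA maze m n (rest ++ (pvChildrenA maze m n rr rc br bc
          (!(pvCell maze rr rc == 3) && (pvCell maze br bc == 4)) (pvCell maze rr rc == 3)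
          (pvVSet vrt rr rc) (pvVSet vbt br bc)).map
          (fun mv => (mv.1, mv.2.1, mv.2.2.1, mv.2.2.2, pvVSet vrt rr rc, pvVSet vbt br bc, cnt + 1)))
    else pvGoA maze m n rest
  termination_by q => (q.map pvWt).sum
  decreasing_by
  · simp only [List.map_append, List.sum_append, List.map_cons, List.sum_cons, List.map_map]
    have h1 : pvShape (pvVSet vrt rr rc) m n = true := by
      simp only [Bool.and_eq_true] at h; exact h.1
    have h2 : pvShape (pvVSet vbt br bc) m n = true := by
      simp only [Bool.and_eq_true] at h; exact h.2
    have hlt := pvChildrenA_wtsum_lt (maze := maze) (rr := rr) (rc := rc) (br := br) (bc := bc)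
      (fb := !(pvCell maze rr rc == 3) && (pvCell maze br bc == 4))
      (fr := pvCell maze rr rc == 3) h1 h2
    have hmap : (pvWt ∘ fun mv : Int × Int × Int × Int =>
        (mv.1, mv.2.1, mv.2.2.1, mv.2.2.2, pvVSet vrt rr rc, pvVSet vbt br bc, cnt + 1))
        = fun mv : Int × Int × Int × Int =>
          17 ^ (pvFalse (pvVSet (pvVSet vrt rr rc) mv.1 mv.2.1)
            + pvFalse (pvVSet (pvVSet vbt br bc) mv.2.2.1 mv.2.2.2)) := rfl
    rw [hmap]
    have hwt : pvWt (rr, rc, br, bc, vrt, vbt, cnt)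
        = 17 ^ (pvFalse (pvVSet vrt rr rc) + pvFalse (pvVSet vbt br bc)) := rfl
    rw [hwt]
    omega
  · simp only [List.map_cons, List.sum_cons]
    have : 0 < pvWt (rr, rc, br, bc, vrt, vbt, cnt) := Nat.pow_pos (by norm_num)
    omega

def solution (maze : List (List Int)) : Int :=
  let m : Int := Int.ofNat maze.length
  let n : Int := Int.ofNat maze.headI.length  -- len(maze[0]); Python raises on [] (outside Pre_)
  let scan :=
    (PySem.List.pyRange 0 m 1).foldl (fun s i =>
      (PySem.List.pyRange 0 n 1).foldl (fun s j =>
        if pvCell maze i j == 1 then (some (i, j), s.2)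
        else if pvCell maze i j == 2 then (s.1, some (i, j))
        else s) s) (none, none)
  let grid0 := (PySem.List.pyRange 0 m 1).map (fun _ => (PySem.List.pyRange 0 n 1).map (fun _ => false))
  match scan with
  | (some (rr, rc), some (br, bc)) =>
    pvGoA maze m n [(rr, rc, br, bc, grid0, grid0, 0)]
  | _ => 0  -- Python raises here (unpacking an empty red/blue list); excluded by Pre_

-- ===== PORT B =====

-- the move-candidate comprehensions of Source B's dfs
def pvMovesB (maze : List (List Int)) (m n rr rc br bc : Int)
    (vr vb : List (List Bool)) : List (Int × Int × Int × Int) :=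
  if pvCell maze rr rc == 3 then
    pvDirs.filterMap (fun d =>
      if pvBounded (br + d.1) (bc + d.2) m n
          && !((br + d.1, bc + d.2) == (rr, rc))
          && !(pvCell maze (br + d.1) (bc + d.2) == 5)
          && !pvVGet vb (br + d.1) (bc + d.2) then
        some (rr, rc, br + d.1, bc + d.2)
      else none)
  else if pvCell maze br bc == 4 then
    pvDirs.filterMap (fun d =>
      if pvBounded (rr + d.1) (rc + d.2) m n
          && !((rr + d.1, rc + d.2) == (br, bc))
          && !(pvCell maze (rr + d.1) (rc + d.2) == 5)
          && !pvVGet vr (rr + d.1) (rc + d.2) then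
        some (rr + d.1, rc + d.2, br, bc)
      else none)
  else
    (pvDirs.filterMap (fun d =>
      if pvBounded (rr + d.1) (rc + d.2) m n
          && !(pvCell maze (rr + d.1) (rc + d.2) == 5)
          && !pvVGet vr (rr + d.1) (rc + d.2) then
        some (rr + d.1, rc + d.2)
      else none)).flatMap (fun rp =>
      pvDirs.filterMap (fun d =>
        if pvBounded (br + d.1) (bc + d.2) m n
            && !(rp == (br + d.1, bc + d.2))
            && !((rp == (br, bc)) && ((br + d.1, bc + d.2) == (rr, rc)))
            && !(pvCell maze (br + d.1) (bc + d.2) == 5)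
            && !pvVGet vb (br + d.1) (bc + d.2) then
          some (rp.1, rp.2, br + d.1, bc + d.2)
        else none))

lemma pvMovesB_exp_lt {maze : List (List Int)} {m n rr rc br bc : Int}
    {vr vb : List (List Bool)}
    {mv : Int × Int × Int × Int}
    (hvr : pvShape vr m n = true) (hvb : pvShape vb m n = true)
    (hm : mv ∈ pvMovesB maze m n rr rc br bc vr vb) :
    pvFalse (pvVSet vr mv.1 mv.2.1) + pvFalse (pvVSet vb mv.2.2.1 mv.2.2.2)
      < pvFalse vr + pvFalse vb := by
  unfold pvMovesB at hm
  by_cases hr3 : (pvCell maze rr rc == 3) = true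
  · rw [if_pos hr3] at hm
    rcases List.mem_filterMap.1 hm with ⟨d, _, hd⟩
    rw [Option.ite_some_none_eq_some] at hd
    obtain ⟨hc, hd⟩ := hd
    subst hd
    simp only [Bool.and_eq_true, Bool.not_eq_true'] at hc
    have := pvFalse_vset_lt vb (br + d.1) (bc + d.2) m n hvb hc.1.1.1 hc.2
    have := pvFalse_vset_le vr rr rc
    simp only []
    omega
  · rw [if_neg hr3] at hm
    by_cases hb4 : (pvCell maze br bc == 4) = true
    · rw [if_pos hb4] at hm
      rcases List.mem_filterMap.1 hm with ⟨d, _, hd⟩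
      rw [Option.ite_some_none_eq_some] at hd
      obtain ⟨hc, hd⟩ := hd
      subst hd
      simp only [Bool.and_eq_true, Bool.not_eq_true'] at hc
      have := pvFalse_vset_lt vr (rr + d.1) (rc + d.2) m n hvr hc.1.1.1 hc.2
      have := pvFalse_vset_le vb br bc
      simp only []
      omega
    · rw [if_neg hb4] at hm
      rcases List.mem_flatMap.1 hm with ⟨rp, hrp, hmem⟩
      rcases List.mem_filterMap.1 hrp with ⟨d, _, hd⟩
      rw [Option.ite_some_none_eq_some] at hd
      obtain ⟨hc, hd⟩ := hd
      subst hd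
      simp only [Bool.and_eq_true, Bool.not_eq_true'] at hc
      rcases List.mem_filterMap.1 hmem with ⟨e, _, he⟩
      rw [Option.ite_some_none_eq_some] at he
      obtain ⟨hc2, he⟩ := he
      subst he
      have := pvFalse_vset_lt vr (rr + d.1) (rc + d.2) m n hvr hc.1.1 hc.2
      have := pvFalse_vset_le vb (br + e.1) (bc + e.2)
      simp only []
      omega

-- Source B's dfs: mark the two current cells, stop at the goal, otherwise recurse on every
-- candidate move and keep the running minimum of d+1 (None = no complete path).
-- The mark/unmark mutation of Source B is the pure marked value passed down; the pvShape test
-- is the same totality guard as in pvGoA (always true on reachable states).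
def pvGoB (maze : List (List Int)) (m n rr rc br bc : Int)
    (vrt vbt : List (List Bool)) : Option Int :=
  if pvCell maze rr rc == 3 && pvCell maze br bc == 4 then some 0
  else if h : pvShape (pvVSet vrt rr rc) m n && pvShape (pvVSet vbt br bc) m n then
    ((pvMovesB maze m n rr rc br bc (pvVSet vrt rr rc) (pvVSet vbt br bc)).attach.map
      (fun mv => pvGoB maze m n mv.1.1 mv.1.2.1 mv.1.2.2.1 mv.1.2.2.2
        (pvVSet vrt rr rc) (pvVSet vbt br bc))).foldl
      (fun best r =>
        match r with
        | none => best
        | some d =>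
          match best with
          | none => some (d + 1)
          | some bv => if d + 1 < bv then some (d + 1) else some bv) none
  else none
  termination_by pvFalse (pvVSet vrt rr rc) + pvFalse (pvVSet vbt br bc)
  decreasing_by
    have h1 : pvShape (pvVSet vrt rr rc) m n = true := by
      simp only [Bool.and_eq_true] at h; exact h.1
    have h2 : pvShape (pvVSet vbt br bc) m n = true := by
      simp only [Bool.and_eq_true] at h; exact h.2
    exact pvMovesB_exp_lt h1 h2 mv.2

def solution_alt (maze : List (List Int)) : Int :=
  let m : Int := Int.ofNat maze.length
  let n : Int := Int.ofNat maze.headI.length  -- len(maze[0]); Python raises on [] (outside Pre_)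
  let ones := (PySem.List.pyRange 0 m 1).flatMap (fun i =>
    ((PySem.List.pyRange 0 n 1).filter (fun j => pvCell maze i j == 1)).map (fun j => (i, j)))
  let twos := (PySem.List.pyRange 0 m 1).flatMap (fun i =>
    ((PySem.List.pyRange 0 n 1).filter (fun j => pvCell maze i j == 2)).map (fun j => (i, j)))
  let grid0 := (PySem.List.pyRange 0 m 1).map (fun _ => PySem.List.pyRepeat [false] n)
  match ones.getLast? with
  | some (sr, sc) =>
    match twos.getLast? with
    | some (sb, sd) =>
      match pvGoB maze m n sr sc sb sd grid0 grid0 with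
      | some a => a
      | none => 0
    | none => 0  -- Python raises here (twos[-1] on an empty list); excluded by Pre_
  | none => 0  -- Python raises here (ones[-1] on an empty list); excluded by Pre_

-- ===== PRECONDITION & SPEC =====

-- Pre_ is exactly where the Python A returns normally: a nonempty maze whose rows are all at
-- least as long as the first row (the scan reads maze[i][j] for j < len(maze[0]) and raises
-- IndexError on a shorter row), containing a red cart 1 and a blue cart 2 in the scanned
-- rectangle (otherwise the queue-entry unpacking raises ValueError).
def Pre_solution (maze : List (List Int)) : Prop :=
  maze ≠ [] ∧ (∀ row ∈ maze, maze.headI.length ≤ row.length) ∧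
  (maze.any (fun row => (row.take maze.headI.length).contains 1)) = true ∧
  (maze.any (fun row => (row.take maze.headI.length).contains 2)) = true

instance (maze : List (List Int)) : Decidable (Pre_solution maze) := by
  unfold Pre_solution; infer_instance

def pvWitness_solution : List (List Int) := [[1, 3], [2, 4]]

def Spec_solution (maze : List (List Int)) (out : Int) : Prop := out = solution_alt maze
instance (maze : List (List Int)) (out : Int) : Decidable (Spec_solution maze out) := by
  unfold Spec_solution; infer_instance

-- ===== CLAIM (what is proved, stated in full; the proofs are below) =====
def Claim_equal_solution : Prop :=
  ∀ (maze : List (List Int)), Dom_solution maze → Pre_solution maze →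
    Spec_solution maze (solution maze)

-- ===== LEMMAS AND PROOFS =====

lemma pvShape_vset (v : List (List Bool)) (i j m n : Int)
    (hs : pvShape v m n = true) : pvShape (pvVSet v i j) m n = true := by
  unfold pvShape at hs ⊢
  simp only [Bool.and_eq_true, beq_iff_eq, List.all_eq_true] at hs ⊢
  obtain ⟨hlen, hrows⟩ := hs
  unfold pvVSet
  rcases pvSetD_cases v i (PySem.List.pySetD (PySem.List.pyGetD v i []) j true) [] with h | ⟨k, hk, hg, hset⟩
  · rw [h]; exact ⟨hlen, hrows⟩
  · rw [hset]
    refine ⟨by simpa using hlen, ?_⟩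
    intro row hr
    rcases List.mem_or_eq_of_mem_set hr with h | h
    · exact hrows _ h
    · subst h
      have hmem : PySem.List.pyGetD v i [] ∈ v := by
        rw [hg]; exact List.getElem_mem hk
      rcases pvSetD_cases (PySem.List.pyGetD v i []) j true true with h2 | ⟨k2, hk2, _, hs2⟩
      · rw [h2]; exact hrows _ hmem
      · rw [hs2]
        have := hrows _ hmem
        simpa using this


-- minimum of two optional path lengths (none = no complete path)
def pvOptMin : Option Int → Option Int → Option Int
  | none, b => b
  | some x, none => some x
  | some x, some y => some (min x y)

-- minimum over a list of optional path lengths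
def pvBestL (l : List (Option Int)) : Option Int := l.foldr pvOptMin none

-- the final answer a queue entry can still contribute: its count plus B's best completion
def pvKey (maze : List (List Int)) (m n : Int) : PvEntry → Option Int
  | (rr, rc, br, bc, vrt, vbt, cnt) =>
    (pvGoB maze m n rr rc br bc vrt vbt).map (· + cnt)

def pvCnt : PvEntry → Int
  | (_, _, _, _, _, _, c) => c

def pvShapeE (m n : Int) : PvEntry → Prop
  | (_, _, _, _, vrt, vbt, _) => pvShape vrt m n = true ∧ pvShape vbt m n = true

-- BFS queue invariant: counts are nondecreasing, spread over at most two adjacent levels,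
-- and all carried grids have shape m × n
def pvInv (m n : Int) (q : List PvEntry) : Prop :=
  (q.map pvCnt).Pairwise (· ≤ ·) ∧
  (∀ e ∈ q, ∀ f ∈ q, pvCnt e ≤ pvCnt f + 1) ∧
  (∀ e ∈ q, pvShapeE m n e)

lemma pvOptMin_none_right (a : Option Int) : pvOptMin a none = a := by
  cases a <;> rfl

lemma pvOptMin_comm (a b : Option Int) : pvOptMin a b = pvOptMin b a := by
  cases a <;> cases b <;> simp [pvOptMin, min_comm]

lemma pvOptMin_assoc (a b c : Option Int) :
    pvOptMin (pvOptMin a b) c = pvOptMin a (pvOptMin b c) := by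
  cases a <;> cases b <;> cases c <;> simp [pvOptMin, min_assoc]

lemma pvBestL_cons (x : Option Int) (l : List (Option Int)) :
    pvBestL (x :: l) = pvOptMin x (pvBestL l) := rfl

lemma pvFoldr_optMin (l : List (Option Int)) (a : Option Int) :
    l.foldr pvOptMin a = pvOptMin (pvBestL l) a := by
  induction l with
  | nil => simp [pvBestL, pvOptMin]
  | cons x t ih => simp [pvBestL, List.foldr_cons, ih, pvOptMin_assoc] at *

lemma pvBestL_append (l₁ l₂ : List (Option Int)) :
    pvBestL (l₁ ++ l₂) = pvOptMin (pvBestL l₁) (pvBestL l₂) := by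
  unfold pvBestL
  rw [List.foldr_append, pvFoldr_optMin, pvFoldr_optMin, pvOptMin_none_right]
  rfl

lemma pvFoldl_optMin (l : List (Option Int)) (a : Option Int) :
    l.foldl pvOptMin a = pvOptMin a (pvBestL l) := by
  induction l generalizing a with
  | nil => simp [pvBestL, pvOptMin_none_right]
  | cons x t ih =>
    rw [List.foldl_cons, ih, pvBestL_cons, ← pvOptMin_assoc]

lemma pvBestL_map_add (l : List (Option Int)) (c : Int) :
    (pvBestL l).map (· + c) = pvBestL (l.map (Option.map (· + c))) := by
  induction l with
  | nil => rfl
  | cons x t ih =>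
    rw [List.map_cons, pvBestL_cons, pvBestL_cons, ← ih]
    cases x <;> cases pvBestL t <;>
      simp [pvOptMin] <;> omega

lemma pvBestL_some_mem (l : List (Option Int)) (v : Int)
    (h : pvBestL l = some v) : some v ∈ l := by
  induction l with
  | nil => simp [pvBestL] at h
  | cons x t ih =>
    rw [pvBestL_cons] at h
    cases hx : x with
    | none =>
      subst hx
      simp [pvOptMin] at h
      exact List.mem_cons_of_mem _ (ih h)
    | some a =>
      subst hx
      cases ht : pvBestL t with
      | none => rw [ht] at h; simp [pvOptMin] at h; subst h; exact List.mem_cons_self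
      | some b =>
        rw [ht] at h
        simp [pvOptMin] at h
        rcases min_cases a b with ⟨hm, _⟩ | ⟨hm, _⟩
        · rw [hm] at h; subst h; exact List.mem_cons_self
        · rw [hm] at h; subst h; exact List.mem_cons_of_mem _ (ih ht)

-- B's running-minimum loop body IS pvOptMin of the shifted result
lemma pvStep_eq (b r : Option Int) :
    (match r with
      | none => b
      | some d =>
        match b with
        | none => some (d + 1)
        | some bv => if d + 1 < bv then some (d + 1) else some bv)
    = pvOptMin b (r.map (· + 1)) := by
  rcases r with _ | d <;> rcases b with _ | bv <;>
    simp [pvOptMin, min_def] <;> split_ifs <;> first | rfl | omega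

-- B's fold over the recursive results computes the minimum of (result + 1)
lemma pvFoldB_eq (l : List (Option Int)) :
    l.foldl (fun best r =>
      match r with
      | none => best
      | some d =>
        match best with
        | none => some (d + 1)
        | some bv => if d + 1 < bv then some (d + 1) else some bv) none
    = pvBestL (l.map (Option.map (· + 1))) := by
  have hstep : (fun (best r : Option Int) =>
      match r with
      | none => best
      | some d =>
        match best with
        | none => some (d + 1)
        | some bv => if d + 1 < bv then some (d + 1) else some bv)
      = fun best r => pvOptMin best (Option.map (· + 1) r) := by
    funext b r
    exact pvStep_eq b r
  rw [hstep, ← List.foldl_map (f := Option.map (· + 1)) (g := pvOptMin), pvFoldl_optMin]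
  rfl

-- a loop appending at most one element per iteration is a filterMap
lemma pvFlatMap_eq_filterMap {α β : Type} (l : List α) (f : α → List β) (g : α → Option β)
    (h : ∀ d ∈ l, f d = (g d).toList) : l.flatMap f = l.filterMap g := by
  induction l with
  | nil => rfl
  | cons x t ih =>
    rw [List.flatMap_cons, List.filterMap_cons, h x List.mem_cons_self,
      ih (fun d hd => h d (List.mem_cons_of_mem _ hd))]
    cases g x <;> rfl

lemma pvFilterMap_flatMap {α β γ : Type} (l : List α) (g : α → Option β) (k : β → List γ) :
    (l.filterMap g).flatMap k = l.flatMap (fun a => ((g a).toList).flatMap k) := by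
  induction l with
  | nil => rfl
  | cons x t ih =>
    rw [List.filterMap_cons, List.flatMap_cons]
    cases g x <;> simp [ih]

-- A's per-state children (with the red_reached/blue_reached flags A computes)
-- are exactly B's candidate moves, in the same order
lemma pvChildren_eq (maze : List (List Int)) (m n rr rc br bc : Int)
    (vr vb : List (List Bool)) :
    pvChildrenA maze m n rr rc br bc
      (!(pvCell maze rr rc == 3) && (pvCell maze br bc == 4)) (pvCell maze rr rc == 3) vr vb
    = pvMovesB maze m n rr rc br bc vr vb := by
  unfold pvChildrenA pvMovesB
  by_cases hr3 : (pvCell maze rr rc == 3) = true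
  · simp only [hr3, Bool.not_true, Bool.false_and, Bool.false_eq_true, if_false, if_true]
    apply pvFlatMap_eq_filterMap
    intro d _
    cases h1 : pvBounded (br + d.1) (bc + d.2) m n <;>
      cases h2 : ((br + d.1, bc + d.2) == (rr, rc)) <;>
      cases h3 : (pvCell maze (br + d.1) (bc + d.2) == 5) <;>
      cases h4 : pvVGet vb (br + d.1) (bc + d.2) <;>
      simp [h1, h2, h3, h4]
  · simp only [Bool.not_eq_true] at hr3
    simp only [hr3, Bool.not_false, Bool.true_and, Bool.false_eq_true, if_false]
    by_cases hb4 : (pvCell maze br bc == 4) = true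
    · simp only [hb4, if_true]
      apply pvFlatMap_eq_filterMap
      intro d _
      cases h1 : pvBounded (rr + d.1) (rc + d.2) m n <;>
        cases h2 : ((rr + d.1, rc + d.2) == (br, bc)) <;>
        cases h3 : (pvCell maze (rr + d.1) (rc + d.2) == 5) <;>
        cases h4 : pvVGet vr (rr + d.1) (rc + d.2) <;>
        simp [h1, h2, h3, h4]
    · simp only [Bool.not_eq_true] at hb4
      simp only [hb4, Bool.false_eq_true, if_false]
      rw [pvFilterMap_flatMap]
      apply List.flatMap_congr
      intro d _
      cases h1 : pvBounded (rr + d.1) (rc + d.2) m n <;>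
        cases h2 : (pvCell maze (rr + d.1) (rc + d.2) == 5) <;>
        cases h3 : pvVGet vr (rr + d.1) (rc + d.2) <;>
        simp [h1, h2, h3]
      apply pvFlatMap_eq_filterMap
      intro e _
      cases h4 : pvBounded (br + e.1) (bc + e.2) m n <;>
        cases h5 : ((rr + d.1, rc + d.2) == (br + e.1, bc + e.2)) <;>
        cases h6 : (((rr + d.1, rc + d.2) == (br, bc)) && ((br + e.1, bc + e.2) == (rr, rc))) <;>
        cases h7 : (pvCell maze (br + e.1) (bc + e.2) == 5) <;>
        cases h8 : pvVGet vb (br + e.1) (bc + e.2) <;>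
        simp [h4, h5, h6, h7, h8] <;>
        first | rfl | (split_ifs <;> rfl)

-- pvGoB at a goal state
lemma pvGoB_goal {maze : List (List Int)} {m n rr rc br bc : Int}
    {vrt vbt : List (List Bool)}
    (hg : (pvCell maze rr rc == 3 && pvCell maze br bc == 4) = true) :
    pvGoB maze m n rr rc br bc vrt vbt = some 0 := by
  rw [pvGoB]
  simp [hg]

-- pvGoB at a live non-goal state: the minimum over all moves of (recursive result + 1)
lemma pvGoB_step {maze : List (List Int)} {m n rr rc br bc : Int}
    {vrt vbt : List (List Bool)}
    (hg : ¬(pvCell maze rr rc == 3 && pvCell maze br bc == 4) = true)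
    (hs : (pvShape (pvVSet vrt rr rc) m n && pvShape (pvVSet vbt br bc) m n) = true) :
    pvGoB maze m n rr rc br bc vrt vbt
    = pvBestL ((pvMovesB maze m n rr rc br bc (pvVSet vrt rr rc) (pvVSet vbt br bc)).map
        (fun mv => (pvGoB maze m n mv.1 mv.2.1 mv.2.2.1 mv.2.2.2
          (pvVSet vrt rr rc) (pvVSet vbt br bc)).map (· + 1))) := by
  rw [pvGoB]
  rw [if_neg hg, dif_pos hs]
  rw [List.attach_map_val (l := pvMovesB maze m n rr rc br bc (pvVSet vrt rr rc) (pvVSet vbt br bc))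
    (f := fun mv => pvGoB maze m n mv.1 mv.2.1 mv.2.2.1 mv.2.2.2 (pvVSet vrt rr rc) (pvVSet vbt br bc))]
  rw [pvFoldB_eq, List.map_map]
  rfl

-- pvGoB under the (never reached) malformed-grid guard
lemma pvGoB_bad {maze : List (List Int)} {m n rr rc br bc : Int}
    {vrt vbt : List (List Bool)}
    (hg : ¬(pvCell maze rr rc == 3 && pvCell maze br bc == 4) = true)
    (hs : ¬(pvShape (pvVSet vrt rr rc) m n && pvShape (pvVSet vbt br bc) m n) = true) :
    pvGoB maze m n rr rc br bc vrt vbt = none := by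
  rw [pvGoB]
  rw [if_neg hg, dif_neg hs]

-- every completion length B reports is nonnegative
lemma pvGoB_nonneg (maze : List (List Int)) (m n : Int) :
    ∀ (rr rc br bc : Int) (vrt vbt : List (List Bool)) (d : Int),
      pvGoB maze m n rr rc br bc vrt vbt = some d → 0 ≤ d := by
  intro rr rc br bc vrt vbt
  induction rr, rc, br, bc, vrt, vbt using pvGoB.induct maze m n with
  | case1 rr rc br bc vrt vbt hg =>
    intro d hd
    rw [pvGoB_goal hg] at hd
    simp at hd
    omega
  | case2 rr rc br bc vrt vbt hg hs ih =>
    intro d hd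
    rw [pvGoB_step hg hs] at hd
    have := pvBestL_some_mem _ _ hd
    rcases List.mem_map.1 this with ⟨mv, hmv, heq⟩
    rcases Option.map_eq_some_iff.1 heq with ⟨d', hd', rfl⟩
    have := ih ⟨mv, hmv⟩ d' hd'
    omega
  | case3 rr rc br bc vrt vbt hg hs =>
    intro d hd
    rw [pvGoB_bad hg hs] at hd
    simp at hd


lemma pvPairwise_const (l : List Int) (c : Int) (h : ∀ x ∈ l, x = c) :
    l.Pairwise (· ≤ ·) := by
  induction l with
  | nil => exact List.Pairwise.nil
  | cons a t ih =>
    refine List.Pairwise.cons (fun b hb => ?_) (ih (fun x hx => h x (List.mem_cons_of_mem _ hx)))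
    rw [h a List.mem_cons_self, h b (List.mem_cons_of_mem _ hb)]

-- the BFS invariant survives popping an entry and appending its children
lemma pvInv_step (maze : List (List Int)) (m n rr rc br bc : Int)
    (vrt vbt : List (List Bool)) (cnt : Int) (rest : List PvEntry)
    (hinv : pvInv m n ((rr, rc, br, bc, vrt, vbt, cnt) :: rest)) :
    pvInv m n (rest ++ (pvChildrenA maze m n rr rc br bc
      (!(pvCell maze rr rc == 3) && (pvCell maze br bc == 4)) (pvCell maze rr rc == 3)
      (pvVSet vrt rr rc) (pvVSet vbt br bc)).map
      (fun mv => (mv.1, mv.2.1, mv.2.2.1, mv.2.2.2, pvVSet vrt rr rc, pvVSet vbt br bc, cnt + 1))) := by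
  obtain ⟨hsort, hspread, hshape⟩ := hinv
  rw [List.map_cons] at hsort
  have hsort' := List.pairwise_cons.mp hsort
  have hhead : ∀ f ∈ rest, cnt ≤ pvCnt f := by
    intro f hf
    exact hsort'.1 _ (List.mem_map_of_mem hf)
  have hcnt_ch : ∀ e ∈ (pvChildrenA maze m n rr rc br bc
      (!(pvCell maze rr rc == 3) && (pvCell maze br bc == 4)) (pvCell maze rr rc == 3)
      (pvVSet vrt rr rc) (pvVSet vbt br bc)).map
      (fun mv => (mv.1, mv.2.1, mv.2.2.1, mv.2.2.2, pvVSet vrt rr rc, pvVSet vbt br bc, cnt + 1)),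
      pvCnt e = cnt + 1 ∧ pvShapeE m n e := by
    intro e he
    rcases List.mem_map.1 he with ⟨mv, _, rfl⟩
    refine ⟨rfl, ?_, ?_⟩
    · exact pvShape_vset _ _ _ _ _ (hshape _ List.mem_cons_self).1
    · exact pvShape_vset _ _ _ _ _ (hshape _ List.mem_cons_self).2
  have hrest_le : ∀ f ∈ rest, pvCnt f ≤ cnt + 1 := by
    intro f hf
    exact hspread _ (List.mem_cons_of_mem _ hf) _ List.mem_cons_self
  refine ⟨?_, ?_, ?_⟩
  · rw [List.map_append]
    rw [List.pairwise_append]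
    refine ⟨hsort'.2, ?_, ?_⟩
    · apply pvPairwise_const _ (cnt + 1)
      intro x hx
      rcases List.mem_map.1 hx with ⟨e, he, rfl⟩
      exact (hcnt_ch e he).1
    · intro x hx y hy
      rcases List.mem_map.1 hx with ⟨e, he, rfl⟩
      rcases List.mem_map.1 hy with ⟨f, hf, rfl⟩
      rw [(hcnt_ch f hf).1]
      exact hrest_le e he
  · intro e he f hf
    rcases List.mem_append.1 he with he' | he' <;> rcases List.mem_append.1 hf with hf' | hf'
    · exact hspread _ (List.mem_cons_of_mem _ he') _ (List.mem_cons_of_mem _ hf')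
    · rw [(hcnt_ch f hf').1]
      have := hrest_le e he'
      omega
    · rw [(hcnt_ch e he').1]
      have := hhead f hf'
      omega
    · rw [(hcnt_ch e he').1, (hcnt_ch f hf').1]
      omega
  · intro e he
    rcases List.mem_append.1 he with he' | he'
    · exact hshape _ (List.mem_cons_of_mem _ he')
    · exact (hcnt_ch e he').2

-- the minimum over the appended children entries is exactly the popped entry's key
lemma pvKey_children (maze : List (List Int)) (m n rr rc br bc : Int)
    (vrt vbt : List (List Bool)) (cnt : Int)
    (hg : ¬(pvCell maze rr rc == 3 && pvCell maze br bc == 4) = true)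
    (hs : (pvShape (pvVSet vrt rr rc) m n && pvShape (pvVSet vbt br bc) m n) = true) :
    pvBestL (((pvChildrenA maze m n rr rc br bc
      (!(pvCell maze rr rc == 3) && (pvCell maze br bc == 4)) (pvCell maze rr rc == 3)
      (pvVSet vrt rr rc) (pvVSet vbt br bc)).map
      (fun mv => (mv.1, mv.2.1, mv.2.2.1, mv.2.2.2, pvVSet vrt rr rc, pvVSet vbt br bc, cnt + 1))).map
      (pvKey maze m n))
    = pvKey maze m n (rr, rc, br, bc, vrt, vbt, cnt) := by
  rw [pvChildren_eq]
  show _ = (pvGoB maze m n rr rc br bc vrt vbt).map (· + cnt)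
  rw [pvGoB_step hg hs, pvBestL_map_add]
  simp only [List.map_map]
  apply congrArg pvBestL
  apply List.map_congr_left
  intro mv _
  simp only [Function.comp, pvKey, Option.map_map]
  apply congrArg (fun f => Option.map f (pvGoB maze m n mv.1 mv.2.1 mv.2.2.1 mv.2.2.2
    (pvVSet vrt rr rc) (pvVSet vbt br bc)))
  funext x
  simp only [Function.comp]
  ring

-- any key of an entry with count ≥ c is ≥ c
lemma pvKey_lower (maze : List (List Int)) (m n : Int) (f : PvEntry) (v : Int)
    (h : pvKey maze m n f = some v) : pvCnt f ≤ v := by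
  obtain ⟨rr, rc, br, bc, vrt, vbt, cnt⟩ := f
  simp only [pvKey] at h
  rcases Option.map_eq_some_iff.1 h with ⟨d, hd, rfl⟩
  have := pvGoB_nonneg maze m n rr rc br bc vrt vbt d hd
  simp only [pvCnt]
  omega

-- MAIN LEMMA: on an invariant-satisfying queue, A's BFS returns the minimum,
-- over all queue entries, of (count + B's best completion), or 0 if there is none
theorem pvGoA_eq (maze : List (List Int)) (m n : Int) :
    ∀ q, pvInv m n q → pvGoA maze m n q = (pvBestL (q.map (pvKey maze m n))).getD 0 := by
  intro q
  induction q using pvGoA.induct maze m n with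
  | case1 =>
    intro _
    rw [pvGoA]
    rfl
  | case2 rr rc br bc vrt vbt cnt rest hgoal =>
    intro hinv
    rw [pvGoA, if_pos hgoal]
    have hkey : pvKey maze m n (rr, rc, br, bc, vrt, vbt, cnt) = some cnt := by
      simp only [pvKey]
      rw [pvGoB_goal hgoal]
      simp
    rw [List.map_cons, pvBestL_cons, hkey]
    obtain ⟨hsort, _, _⟩ := hinv
    rw [List.map_cons] at hsort
    have hhead := (List.pairwise_cons.mp hsort).1
    cases ht : pvBestL (rest.map (pvKey maze m n)) with
    | none => rfl
    | some v =>
      have hmem := pvBestL_some_mem _ _ ht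
      rcases List.mem_map.1 hmem with ⟨f, hf, hfk⟩
      have hv : cnt ≤ v := by
        have h2 := pvKey_lower maze m n f v hfk
        have h3 : cnt ≤ pvCnt f := hhead _ (List.mem_map_of_mem hf)
        omega
      simp [pvOptMin, min_eq_left hv]
  | case3 rr rc br bc vrt vbt cnt rest hgoal hshape ih =>
    intro hinv
    rw [pvGoA, if_neg hgoal, dif_pos hshape]
    rw [ih (pvInv_step maze m n rr rc br bc vrt vbt cnt rest hinv)]
    rw [List.map_append, pvBestL_append, List.map_cons, pvBestL_cons]
    rw [pvKey_children maze m n rr rc br bc vrt vbt cnt hgoal hshape]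
    rw [pvOptMin_comm]
  | case4 rr rc br bc vrt vbt cnt rest hgoal hshape =>
    intro hinv
    exfalso
    apply hshape
    have h := hinv.2.2 _ List.mem_cons_self
    simp only [Bool.and_eq_true]
    exact ⟨pvShape_vset _ _ _ _ _ h.1, pvShape_vset _ _ _ _ _ h.2⟩


-- ===== the two start-position scans agree =====

lemma pvGetLastOr_cons {α : Type} (x : α) (l : List α) (s : Option α) :
    ((x :: l).getLast?).or s = (l.getLast?).or (some x) := by
  rw [List.getLast?_cons]
  cases h : l.getLast? <;> simp [h]

-- A's single pass keeping the last 1 and the last 2 is the pair of last filtered matches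
lemma pvScanPair (P Q : Int × Int → Bool) (hPQ : ∀ p, Q p = true → P p = false) :
    ∀ (L : List (Int × Int)) (s : Option (Int × Int) × Option (Int × Int)),
    L.foldl (fun s p => if P p then (some p, s.2) else if Q p then (s.1, some p) else s) s
    = (((L.filter P).getLast?).or s.1, ((L.filter Q).getLast?).or s.2) := by
  intro L
  induction L with
  | nil => intro s; simp
  | cons x t ih =>
    intro s
    rw [List.foldl_cons, ih]
    cases hP : P x with
    | true =>
      have hQ : Q x = false := by
        cases hQ : Q x
        · rfl
        · rw [hPQ x hQ] at hP; exact absurd hP (by simp)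
      simp only [hP, if_true, List.filter_cons, hQ, if_false]
      rw [pvGetLastOr_cons]
      simp
    | false =>
      cases hQ : Q x with
      | true =>
        simp only [hP, hQ, List.filter_cons]
        simp only [Bool.false_eq_true, if_false, if_true]
        rw [pvGetLastOr_cons]
      | false =>
        simp only [hP, hQ, List.filter_cons]
        simp

def pvPos (m n : Int) : List (Int × Int) :=
  (PySem.List.pyRange 0 m 1).flatMap (fun i => (PySem.List.pyRange 0 n 1).map (fun j => (i, j)))

lemma pvFlatMap_filter {α β : Type} (l : List α) (g : α → List β) (p : β → Bool) :
    l.flatMap (fun a => (g a).filter p) = (l.flatMap g).filter p := by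
  induction l with
  | nil => rfl
  | cons x t ih => simp [List.flatMap_cons, List.filter_append, ih]

-- B's comprehension is the filter of the row-major position list
lemma pvOnes_eq (maze : List (List Int)) (m n : Int) (c : Int) :
    (PySem.List.pyRange 0 m 1).flatMap (fun i =>
      ((PySem.List.pyRange 0 n 1).filter (fun j => pvCell maze i j == c)).map (fun j => (i, j)))
    = (pvPos m n).filter (fun p => pvCell maze p.1 p.2 == c) := by
  unfold pvPos
  rw [← pvFlatMap_filter]
  apply List.flatMap_congr
  intro i _
  rw [List.filter_map]
  rfl

-- A's nested scan loops are the single fold over the position list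
lemma pvScanFold_eq (maze : List (List Int)) (m n : Int)
    (s : Option (Int × Int) × Option (Int × Int)) :
    (PySem.List.pyRange 0 m 1).foldl (fun s i =>
      (PySem.List.pyRange 0 n 1).foldl (fun s j =>
        if pvCell maze i j == 1 then (some (i, j), s.2)
        else if pvCell maze i j == 2 then (s.1, some (i, j))
        else s) s) s
    = (pvPos m n).foldl (fun s p =>
        if pvCell maze p.1 p.2 == 1 then (some p, s.2)
        else if pvCell maze p.1 p.2 == 2 then (s.1, some p)
        else s) s := by
  unfold pvPos
  rw [List.foldl_flatMap]
  apply List.foldl_ext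
  intro acc i _
  rw [List.foldl_map]

-- the all-False starting grids of the two ports are the same value
lemma pvGrid0_eq (m n : Int) :
    (PySem.List.pyRange 0 m 1).map (fun _ => (PySem.List.pyRange 0 n 1).map (fun _ => false))
    = (PySem.List.pyRange 0 m 1).map (fun _ => PySem.List.pyRepeat [false] n) := by
  apply List.map_congr_left
  intro i _
  rw [PySem.List.pyRepeat_singleton, List.map_const', PySem.List.length_pyRange_one]
  norm_num

lemma pvGrid0_shape (m n : Int) (hm : 0 ≤ m) (hn : 0 ≤ n) :
    pvShape ((PySem.List.pyRange 0 m 1).map (fun _ => (PySem.List.pyRange 0 n 1).map (fun _ => false))) m n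
      = true := by
  unfold pvShape
  simp only [Bool.and_eq_true, beq_iff_eq, List.all_eq_true]
  constructor
  · rw [List.length_map, PySem.List.length_pyRange_one]
    omega
  · intro row hr
    rcases List.mem_map.1 hr with ⟨_, _, rfl⟩
    rw [List.length_map, PySem.List.length_pyRange_one]
    omega


lemma pvPos_mem (m n i j : Int) (h1 : 0 <= i) (h2 : i < m) (h3 : 0 <= j) (h4 : j < n) :
    (i, j) ∈ pvPos m n := by
  unfold pvPos
  rw [List.mem_flatMap]
  refine ⟨i, ?_, List.mem_map.2 ⟨j, ?_, rfl⟩⟩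
  · rw [PySem.List.mem_pyRange_one]; omega
  · rw [PySem.List.mem_pyRange_one]; omega

lemma pvCell_nat (maze : List (List Int)) (i j : Nat) (hi : i < maze.length)
    (hj : j < maze[i].length) : pvCell maze (i : Int) (j : Int) = maze[i][j] := by
  unfold pvCell
  rw [PySem.List.pyGetD_of_nonneg _ _ (Int.natCast_nonneg i)]
  rw [Int.toNat_natCast, List.getD_eq_getElem?_getD, List.getElem?_eq_getElem hi]
  rw [PySem.List.pyGetD_of_nonneg _ _ (Int.natCast_nonneg j)]
  rw [Int.toNat_natCast]
  simp [List.getD_eq_getElem?_getD, List.getElem?_eq_getElem hj]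

-- a cart cell inside the scanned rectangle yields a nonempty filtered position list
lemma pvFilter_ne (maze : List (List Int)) (c : Int)
    (hc : maze.any (fun row => (row.take maze.headI.length).contains c) = true) :
    (pvPos (maze.length : Int) (maze.headI.length : Int)).filter
      (fun p => pvCell maze p.1 p.2 == c) ≠ [] := by
  rw [List.any_eq_true] at hc
  rcases hc with ⟨row, hrow, hmem⟩
  rw [List.contains_eq_mem, decide_eq_true_eq] at hmem
  rcases List.mem_iff_getElem.1 hmem with ⟨j, hj, hget⟩
  rcases List.mem_iff_getElem.1 hrow with ⟨i, hi, rfl⟩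
  rw [List.length_take] at hj
  have hjr : j < maze[i].length := by omega
  have hjn : j < maze.headI.length := by omega
  rw [List.getElem_take] at hget
  apply List.ne_nil_of_mem (a := ((i : Int), (j : Int)))
  rw [List.mem_filter]
  refine ⟨pvPos_mem _ _ _ _ (by omega) (by exact_mod_cast hi) (by omega) (by exact_mod_cast hjn), ?_⟩
  rw [pvCell_nat maze i j hi hjr, hget]
  simp

-- ===== VERDICT (by name: the statement is the Claim_ definition above) =====
theorem solution_spec : Claim_equal_solution := by
  unfold Claim_equal_solution
  intro maze _ hpre
  unfold Spec_solution solution solution_alt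
  obtain ⟨hne, hrows, hone, htwo⟩ := hpre
  simp only [Int.ofNat_eq_natCast]
  rw [pvScanFold_eq, pvScanPair
    (fun p => pvCell maze p.1 p.2 == 1) (fun p => pvCell maze p.1 p.2 == 2)
    (by intro p hq; rw [beq_iff_eq] at *; simp at hq ⊢; omega),
    pvOnes_eq, pvOnes_eq, pvGrid0_eq]
  simp only [Option.or_none]
  have h1 := pvFilter_ne maze 1 hone
  have h2 := pvFilter_ne maze 2 htwo
  cases hL1 : ((pvPos (maze.length : Int) (maze.headI.length : Int)).filter
      (fun p => pvCell maze p.1 p.2 == 1)).getLast? with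
  | none => exact absurd (List.getLast?_eq_none_iff.1 hL1) h1
  | some p1 =>
  cases hL2 : ((pvPos (maze.length : Int) (maze.headI.length : Int)).filter
      (fun p => pvCell maze p.1 p.2 == 2)).getLast? with
  | none => exact absurd (List.getLast?_eq_none_iff.1 hL2) h2
  | some p2 =>
  obtain ⟨r1, c1⟩ := p1
  obtain ⟨r2, c2⟩ := p2
  rw [← pvGrid0_eq]
  dsimp only
  have hinv : pvInv (maze.length : Int) (maze.headI.length : Int)
      [(r1, c1, r2, c2,
        (PySem.List.pyRange 0 (maze.length : Int) 1).map
          (fun _ => (PySem.List.pyRange 0 (maze.headI.length : Int) 1).map (fun _ => false)),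
        (PySem.List.pyRange 0 (maze.length : Int) 1).map
          (fun _ => (PySem.List.pyRange 0 (maze.headI.length : Int) 1).map (fun _ => false)), 0)] := by
    refine ⟨by simp, by intro e he f hf; simp at he hf; subst he; subst hf; simp, ?_⟩
    intro e he
    simp only [List.mem_singleton] at he
    subst he
    exact ⟨pvGrid0_shape _ _ (by omega) (by omega), pvGrid0_shape _ _ (by omega) (by omega)⟩
  rw [pvGoA_eq _ _ _ _ hinv]
  rw [List.map_singleton, pvBestL_cons]
  rw [show pvBestL [] = none from rfl, pvOptMin_none_right]
  simp only [pvKey]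
  cases pvGoB maze (maze.length : Int) (maze.headI.length : Int) r1 c1 r2 c2
      ((PySem.List.pyRange 0 (maze.length : Int) 1).map
        (fun _ => (PySem.List.pyRange 0 (maze.headI.length : Int) 1).map (fun _ => false)))
      ((PySem.List.pyRange 0 (maze.length : Int) 1).map
        (fun _ => (PySem.List.pyRange 0 (maze.headI.length : Int) 1).map (fun _ => false))) with
  | none => rfl
  | some a => simp
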